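-- pv_equiv track=rewrite | github.com/lolit98919191929/lol | nvr.py | increment_thai_phone
-- ===== SOURCE A (Python) =====
-- def increment_thai_phone(phone):
--     if not phone.startswith("+") or len(phone) < 8:
--         return phone
--     lst = list(phone)
--     pos = 7
--     carry = 1
--     i = pos
--     while i >= 1 and carry:
--         if lst[i].isdigit():
--             s = int(lst[i]) + carry
--             lst[i] = str(s % 10)
--             carry = 1 if s >= 10 else 0
--         i -= 1
--     return "".join(lst)
-- ===== SOURCE B (Python) =====
-- def increment_thai_phone(phone):
--     if not phone.startswith("+") or len(phone) < 8:
--         return phone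
--     head, window, rest = phone[:1], phone[1:8], phone[8:]
--     digits = [ch for ch in window if ch.isdigit()]
--     n = 0
--     for ch in digits:
--         n = 10 * n + int(ch)
--     m = (n + 1) % 10 ** len(digits)
--     new = []
--     for _ in digits:
--         new.append(m % 10)
--         m //= 10
--     new.reverse()
--     out = []
--     for ch in window:
--         if ch.isdigit():
--             out.append(str(new.pop(0)))
--         else:
--             out.append(ch)
--     return head + "".join(out) + rest
-- ===== Notes on version B (the rewrite author's own statement) =====
-- stated objective: alternative
-- what changed: A mutates a char list in place with a per-digit right-to-left carry loop over indices 7..1; B slices out the window phone[1:8], reads its digit subsequence as one integer n, computes (n+1) mod 10^k by arithmetic, re-derives the k digits by divmod and rebuilds the string around the unchanged non-digit characters.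
import Mathlib
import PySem

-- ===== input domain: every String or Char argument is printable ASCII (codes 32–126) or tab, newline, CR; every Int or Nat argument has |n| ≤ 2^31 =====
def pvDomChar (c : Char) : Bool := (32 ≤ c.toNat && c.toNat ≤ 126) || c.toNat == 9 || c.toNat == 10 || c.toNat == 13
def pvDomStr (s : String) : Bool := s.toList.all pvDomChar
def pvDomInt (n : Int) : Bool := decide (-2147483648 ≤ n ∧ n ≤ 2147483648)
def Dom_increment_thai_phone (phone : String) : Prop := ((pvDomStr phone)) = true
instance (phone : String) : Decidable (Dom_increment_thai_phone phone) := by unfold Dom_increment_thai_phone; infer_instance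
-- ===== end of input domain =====

-- B replaces A's in-place right-to-left carry loop by slicing out the window, incrementing the
-- digit subsequence as one integer ((n+1) mod 10^k) and rebuilding; alternative decomposition,
-- no speed claim.

-- ===== PORT A =====
-- str(d) for a one-digit nonnegative d: its single character
def pvStrDigit (d : Int) : Char := (PySem.Int.toChars d).headI
-- int(str-of-one-char c) for a digit character c (both programs guard this by isdigit)
def pvDigitVal (c : Char) : Int := (PySem.Int.ofChars? [c]).getD 0

-- the 'while i >= 1 and carry' loop of A, state (lst, carry, i)
def pvLoopA (lst : List Char) (carry : Int) (i : Int) : List Char :=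
  if h : 1 ≤ i ∧ carry ≠ 0 then
    if PySem.Chars.isdigit (PySem.List.pyGetD lst i ' ') then
      let s := pvDigitVal (PySem.List.pyGetD lst i ' ') + carry
      pvLoopA (PySem.List.pySetD lst i (pvStrDigit (PySem.Int.mod s 10)))
        (if 10 ≤ s then 1 else 0) (i - 1)
    else pvLoopA lst carry (i - 1)
  else lst
termination_by i.toNat
decreasing_by all_goals omega

def increment_thai_phone (phone : String) : String :=
  if ¬ (PySem.Str.startswith phone "+" = true) ∨ PySem.Str.len phone < 8 then phone
  else String.ofList (pvLoopA phone.toList 1 7)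

-- ===== PORT B =====
-- one step of B's digit-producing loop: new.append(m % 10); m //= 10
def pvToNew (p : List Int × Int) (_ch : Char) : List Int × Int :=
  (p.1 ++ [PySem.Int.mod p.2 10], PySem.Int.floordiv p.2 10)

-- one step of B's rebuild loop: out.append(str(new.pop(0)) if digit else ch)
-- (the [] branch is unreachable: new has exactly one entry per digit of the window)
def pvWriteOut (p : List Int × List Char) (ch : Char) : List Int × List Char :=
  if PySem.Chars.isdigit ch then
    match p.1 with
    | v :: vs => (vs, p.2 ++ [pvStrDigit v])
    | [] => ([], p.2 ++ [ch])
  else (p.1, p.2 ++ [ch])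

def increment_thai_phone_alt (phone : String) : String :=
  if ¬ (PySem.Str.startswith phone "+" = true) ∨ PySem.Str.len phone < 8 then phone
  else
    let cs := phone.toList
    let head := PySem.List.slice cs none (some 1)
    let window := PySem.List.slice cs (some 1) (some 8)
    let rest := PySem.List.slice cs (some 8) none
    let digits := window.filter PySem.Chars.isdigit
    let n := digits.foldl (fun a ch => 10 * a + pvDigitVal ch) 0
    let m := PySem.Int.mod (n + 1) (10 ^ digits.length)
    let new := ((digits.foldl pvToNew ([], m)).1).reverse
    let out := (window.foldl pvWriteOut (new, [])).2
    String.ofList (head ++ out ++ rest)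

-- ===== PRECONDITION & SPEC =====
def Spec_increment_thai_phone (phone : String) (out : String) : Prop := out = increment_thai_phone_alt phone
instance (phone : String) (out : String) : Decidable (Spec_increment_thai_phone phone out) := by unfold Spec_increment_thai_phone; infer_instance

-- ===== CLAIM (what is proved, stated in full; the proofs are below) =====
def Claim_equal_increment_thai_phone : Prop := ∀ (phone : String), Dom_increment_thai_phone phone → Spec_increment_thai_phone phone (increment_thai_phone phone)

-- ===== LEMMAS AND PROOFS =====

-- structural description of one step of A's carry loop
def pvStep (ch : Char) (co : Int) : Char × Int :=
  if co ≠ 0 ∧ PySem.Chars.isdigit ch then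
    (pvStrDigit (PySem.Int.mod (pvDigitVal ch + co) 10),
     if 10 ≤ pvDigitVal ch + co then 1 else 0)
  else (ch, co)

-- A's loop as a structural right-to-left pass over the window (carry enters at the right end)
def pvIncW : List Char → Int → List Char × Int
  | [], c => ([], c)
  | ch :: t, c =>
    let r := pvIncW t c
    ((pvStep ch r.2).1 :: r.1, (pvStep ch r.2).2)

-- decimal value of a list of digit characters
def pvValN (cs : List Char) : Nat := cs.foldl (fun a c => 10 * a + (c.toNat - 48)) 0

-- the k low decimal digits of m, least significant first
def pvRevDigits : Nat → Nat → List Nat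
  | 0, _ => []
  | k+1, m => m % 10 :: pvRevDigits k (m / 10)

-- the k low decimal digits of m, most significant first (with leading zeros)
def pvPadded (k m : Nat) : List Nat := (pvRevDigits k m).reverse

-- replace the digit characters of w, left to right, by the given digit values
def pvRepl : List Char → List Nat → List Char
  | [], _ => []
  | ch :: t, vs =>
    if PySem.Chars.isdigit ch then
      match vs with
      | v :: vs' => Char.ofNat (48 + v) :: pvRepl t vs'
      | [] => ch :: pvRepl t []
    else ch :: pvRepl t vs

lemma digit_enum (ch : Char) (h : PySem.Chars.isdigit ch = true) :
    ch = '0' ∨ ch = '1' ∨ ch = '2' ∨ ch = '3' ∨ ch = '4' ∨ ch = '5' ∨ ch = '6' ∨ ch = '7' ∨ ch = '8' ∨ ch = '9' := by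
  simp only [PySem.Chars.isdigit, Bool.and_eq_true, decide_eq_true_eq, Char.le_def] at h
  have h1 : 48 ≤ ch.toNat := h.1
  have h2 : ch.toNat ≤ 57 := h.2
  have hten : ch.toNat = 48 ∨ ch.toNat = 49 ∨ ch.toNat = 50 ∨ ch.toNat = 51 ∨ ch.toNat = 52 ∨ ch.toNat = 53 ∨ ch.toNat = 54 ∨ ch.toNat = 55 ∨ ch.toNat = 56 ∨ ch.toNat = 57 := by omega
  rcases hten with h'|h'|h'|h'|h'|h'|h'|h'|h'|h' <;> rw [← Char.ofNat_toNat ch, h'] <;> decide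

lemma digitVal_eq (ch : Char) (h : PySem.Chars.isdigit ch = true) :
    pvDigitVal ch = ((ch.toNat - 48 : Nat) : Int) := by
  rcases digit_enum ch h with rfl|rfl|rfl|rfl|rfl|rfl|rfl|rfl|rfl|rfl <;> decide

lemma digitVal_le (ch : Char) (h : PySem.Chars.isdigit ch = true) : ch.toNat - 48 ≤ 9 := by
  rcases digit_enum ch h with rfl|rfl|rfl|rfl|rfl|rfl|rfl|rfl|rfl|rfl <;> decide

lemma chr_digit (ch : Char) (h : PySem.Chars.isdigit ch = true) :
    Char.ofNat (48 + (ch.toNat - 48)) = ch := by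
  rcases digit_enum ch h with rfl|rfl|rfl|rfl|rfl|rfl|rfl|rfl|rfl|rfl <;> decide

lemma strDigit_eq (v : Nat) (hv : v ≤ 9) : pvStrDigit ((v : Nat) : Int) = Char.ofNat (48 + v) := by
  interval_cases v <;> decide

lemma mod_cast_py (a b : Nat) : PySem.Int.mod ((a : Nat) : Int) ((b : Nat) : Int) = ((a % b : Nat) : Int) := by
  simp [PySem.Int.mod, Int.fmod_eq_emod]

lemma fdiv_cast_py (a b : Nat) : PySem.Int.floordiv ((a : Nat) : Int) ((b : Nat) : Int) = ((a / b : Nat) : Int) := by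
  simp [PySem.Int.floordiv, Int.fdiv_eq_ediv]

lemma mod10_cast (a : Nat) : PySem.Int.mod ((a : Nat) : Int) 10 = ((a % 10 : Nat) : Int) := by
  simpa using mod_cast_py a 10

lemma fdiv10_cast (a : Nat) : PySem.Int.floordiv ((a : Nat) : Int) 10 = ((a / 10 : Nat) : Int) := by
  simpa using fdiv_cast_py a 10

lemma pvIncW_zero (w : List Char) : pvIncW w 0 = (w, 0) := by
  induction w with
  | nil => rfl
  | cons ch t ih => simp [pvIncW, ih, pvStep]

lemma pvIncW_snoc (seg : List Char) (x : Char) (c : Int) :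
    pvIncW (seg ++ [x]) c =
      ((pvIncW seg (pvStep x c).2).1 ++ [(pvStep x c).1], (pvIncW seg (pvStep x c).2).2) := by
  induction seg with
  | nil => simp [pvIncW]
  | cons ch t ih => simp [pvIncW, ih]

lemma set_take_drop (t : List Char) (j : Nat) (c : Char) (h : j < t.length) :
    (t.set j c).take j = t.take j ∧ (t.set j c).drop j = c :: t.drop (j+1) := by
  rw [List.set_eq_take_cons_drop c h]
  have hlt : (List.take j t).length = j := by simp [Nat.le_of_lt h]
  constructor
  · rw [List.take_append_of_le_length (by omega)]
    simp [List.take_take]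
  · rw [List.drop_append_of_le_length (by omega)]
    simp

lemma loopA_eq (j : Nat) : ∀ (t : List Char) (c0 : Char) (carry : Int), j ≤ t.length →
    pvLoopA (c0 :: t) carry ((j : Nat) : Int) = c0 :: (pvIncW (t.take j) carry).1 ++ t.drop j := by
  induction j with
  | zero =>
    intro t c0 carry _
    rw [pvLoopA]
    simp [pvIncW]
  | succ j ih =>
    intro t c0 carry hj
    have hjl : j < t.length := by omega
    rw [pvLoopA]
    by_cases hc : carry = 0
    · subst hc
      simp [pvIncW_zero]
    · have hcond : (1 : Int) ≤ ((j+1 : Nat) : Int) ∧ carry ≠ 0 := by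
        constructor
        · push_cast; omega
        · exact hc
      rw [dif_pos hcond]
      have hget : PySem.List.pyGetD (c0 :: t) (((j+1 : Nat) : Int)) ' ' = t[j] := by
        rw [PySem.List.pyGetD_natCast]
        rw [List.getD_cons_succ]
        exact List.getD_eq_getElem t ' ' hjl
      have hsub : ((j+1 : Nat) : Int) - 1 = ((j : Nat) : Int) := by push_cast; ring
      have htake : t.take (j+1) = t.take j ++ [t[j]] := List.take_succ_eq_append_getElem hjl
      by_cases hdg : PySem.Chars.isdigit t[j] = true
      · rw [if_pos (by rw [hget]; exact hdg)]
        rw [hget, hsub]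
        show pvLoopA (PySem.List.pySetD (c0 :: t) (((j+1 : Nat) : Int))
            (pvStrDigit (PySem.Int.mod (pvDigitVal t[j] + carry) 10)))
            (if 10 ≤ pvDigitVal t[j] + carry then 1 else 0) (((j : Nat) : Int))
          = c0 :: (pvIncW (t.take (j+1)) carry).1 ++ t.drop (j+1)
        have hset : PySem.List.pySetD (c0 :: t)
            ((((j+1 : Nat)) : Int)) (pvStrDigit (PySem.Int.mod (pvDigitVal t[j] + carry) 10))
            = c0 :: t.set j (pvStrDigit (PySem.Int.mod (pvDigitVal t[j] + carry) 10)) := by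
          rw [PySem.List.pySetD_natCast]
          rfl
        rw [hset]
        set x' := pvStrDigit (PySem.Int.mod (pvDigitVal t[j] + carry) 10) with hx'
        set c' : Int := if 10 ≤ pvDigitVal t[j] + carry then 1 else 0 with hc'
        rw [ih (t.set j x') c0 c' (by simp; omega)]
        obtain ⟨h1, h2⟩ := set_take_drop t j x' hjl
        rw [h1, h2, htake, pvIncW_snoc]
        have hstep : pvStep t[j] carry = (x', c') := by
          rw [pvStep, if_pos ⟨hc, hdg⟩]
        rw [hstep]
        simp
      · rw [if_neg (by rw [hget]; exact hdg)]
        rw [hsub, ih t c0 carry (by omega)]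
        rw [htake, pvIncW_snoc]
        have hstep : pvStep t[j] carry = (t[j], carry) := by
          rw [pvStep, if_neg (by tauto)]
        rw [hstep]
        have hdrop : t.drop j = t[j] :: t.drop (j+1) := List.drop_eq_getElem_cons hjl
        rw [hdrop]
        simp

lemma valN_aux (xs : List Char) : ∀ (a : Nat),
    xs.foldl (fun a c => 10 * a + (c.toNat - 48)) a = a * 10 ^ xs.length + pvValN xs := by
  induction xs with
  | nil => intro a; simp [pvValN]
  | cons x t ih =>
    intro a
    simp only [List.foldl_cons, List.length_cons, pvValN] at *
    rw [ih, ih (10 * 0 + (x.toNat - 48))]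
    ring

lemma valN_cons (x : Char) (xs : List Char) :
    pvValN (x :: xs) = (x.toNat - 48) * 10 ^ xs.length + pvValN xs := by
  show List.foldl _ _ _ = _
  rw [List.foldl_cons, valN_aux]
  ring_nf

lemma valN_lt (ds : List Char) (h : ∀ c ∈ ds, PySem.Chars.isdigit c = true) :
    pvValN ds < 10 ^ ds.length := by
  induction ds with
  | nil => simp [pvValN]
  | cons x t ih =>
    have hx : x.toNat - 48 ≤ 9 := digitVal_le x (h x (by simp))
    have ht : pvValN t < 10 ^ t.length := ih (fun c hc => h c (by simp [hc]))
    rw [valN_cons]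
    calc (x.toNat - 48) * 10 ^ t.length + pvValN t
        ≤ 9 * 10 ^ t.length + pvValN t := by
          have := Nat.mul_le_mul_right (10 ^ t.length) hx; omega
      _ < 10 ^ (x :: t).length := by
          simp only [List.length_cons, pow_succ]; omega

lemma revDigits_mod (k : Nat) : ∀ m, pvRevDigits k (m % 10 ^ k) = pvRevDigits k m := by
  induction k with
  | zero => intro m; rfl
  | succ k ih =>
    intro m
    have h1 : m % 10 ^ (k+1) % 10 = m % 10 := by
      rw [Nat.mod_mod_of_dvd]
      exact ⟨10 ^ k, by ring⟩
    have h2 : m % 10 ^ (k+1) / 10 = m / 10 % 10 ^ k := by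
      rw [show (10:Nat) ^ (k+1) = 10 * 10 ^ k by ring, Nat.mod_mul_right_div_self]
    simp only [pvRevDigits, h1, h2, ih]

lemma padded_head (k : Nat) : ∀ m, pvPadded (k + 1) m = (m / 10 ^ k) % 10 :: pvPadded k m := by
  induction k with
  | zero => intro m; simp [pvPadded, pvRevDigits]
  | succ k ih =>
    intro m
    have h0 : pvPadded (k + 1 + 1) m = pvPadded (k+1) (m / 10) ++ [m % 10] := by
      simp [pvPadded, pvRevDigits]
    rw [h0, ih (m / 10)]
    have hd : m / 10 / 10 ^ k = m / 10 ^ (k+1) := by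
      rw [Nat.div_div_eq_div_mul]; ring_nf
    simp [pvPadded, pvRevDigits, hd]

lemma revDigits_len (k : Nat) : ∀ (m : Nat), (pvRevDigits k m).length = k := by
  induction k with
  | zero => intro m; rfl
  | succ k ih => intro m; simp [pvRevDigits, ih]

lemma revDigits_le (k : Nat) : ∀ m, ∀ v ∈ pvRevDigits k m, v ≤ 9 := by
  induction k with
  | zero => intro m v hv; simp [pvRevDigits] at hv
  | succ k ih =>
    intro m v hv
    simp only [pvRevDigits, List.mem_cons] at hv
    rcases hv with rfl | hv
    · omega
    · exact ih _ v hv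

-- core: A's carry pass computes B's arithmetic result
lemma pvIncW_core (w : List Char) (c : Int) (hc : c = 0 ∨ c = 1) :
    pvIncW w c =
      (pvRepl w (pvPadded (w.filter PySem.Chars.isdigit).length
          ((pvValN (w.filter PySem.Chars.isdigit) + c.toNat) % 10 ^ (w.filter PySem.Chars.isdigit).length)),
       if pvValN (w.filter PySem.Chars.isdigit) + c.toNat = 10 ^ (w.filter PySem.Chars.isdigit).length then 1 else 0) := by
  induction w with
  | nil =>
    rcases hc with rfl | rfl <;> simp [pvIncW, pvValN, pvPadded, pvRevDigits, pvRepl]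
  | cons ch t ih =>
    have hctle : c.toNat ≤ 1 := by rcases hc with rfl | rfl <;> decide
    set k := (t.filter PySem.Chars.isdigit).length with hk
    set n := pvValN (t.filter PySem.Chars.isdigit) with hn
    have hnlt : n < 10 ^ k := by
      apply valN_lt
      intro x hx
      exact (List.mem_filter.mp hx).2
    have hpow : (0:Nat) < 10 ^ k := pow_pos (by norm_num : (0:Nat) < 10) k
    by_cases hd : PySem.Chars.isdigit ch = true
    · have hfil : (ch :: t).filter PySem.Chars.isdigit = ch :: t.filter PySem.Chars.isdigit := by
        simp [List.filter_cons, hd]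
      set d := ch.toNat - 48 with hdv
      have hd9 : d ≤ 9 := digitVal_le ch hd
      have hN : pvValN (ch :: t.filter PySem.Chars.isdigit) = d * 10 ^ k + n := by
        rw [valN_cons, hk, hn]
      rw [pvIncW, ih, hfil, hN]
      simp only [List.length_cons]
      by_cases hco : n + c.toNat = 10 ^ k
      · -- carry comes in from the right part
        have hstep : pvStep ch (if n + c.toNat = 10 ^ k then 1 else 0)
            = (Char.ofNat (48 + (d + 1) % 10), if d = 9 then 1 else 0) := by
          rw [if_pos hco, pvStep,
            if_pos (show (1:Int) ≠ 0 ∧ PySem.Chars.isdigit ch = true from ⟨by norm_num, hd⟩)]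
          rw [digitVal_eq ch hd, ← hdv]
          simp only [Prod.mk.injEq]
          constructor
          · rw [show ((d:Nat) : Int) + 1 = (((d + 1 : Nat)) : Int) by push_cast; ring,
              mod10_cast, strDigit_eq _ (by omega : (d + 1) % 10 ≤ 9)]
          · by_cases h9 : d = 9
            · rw [if_pos h9, h9]; norm_num
            · rw [if_neg h9, if_neg (by push_cast; omega)]
        have hM : (d * 10 ^ k + n + c.toNat) % 10 ^ (k + 1) = ((d + 1) % 10) * 10 ^ k := by
          rw [show d * 10 ^ k + n + c.toNat = (d + 1) * 10 ^ k by rw [add_assoc, hco]; ring,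
            pow_succ, mul_comm (10 ^ k) 10, Nat.mul_mod_mul_right]
        have hMdiv : ((d + 1) % 10) * 10 ^ k / 10 ^ k = (d + 1) % 10 :=
          Nat.mul_div_cancel _ hpow
        have hMmod : ((d + 1) % 10) * 10 ^ k % 10 ^ k = 0 := Nat.mul_mod_left _ _
        have hcout : (d * 10 ^ k + n + c.toNat = 10 ^ (k + 1)) ↔ (d = 9) := by
          rw [show d * 10 ^ k + n + c.toNat = (d + 1) * 10 ^ k by rw [add_assoc, hco]; ring,
            pow_succ, mul_comm (10 ^ k) 10]
          constructor
          · intro h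
            have := Nat.eq_of_mul_eq_mul_right hpow h
            omega
          · intro h9; rw [h9]
        rw [hstep]
        have h0 : pvPadded k ((d + 1) % 10 * 10 ^ k) = pvPadded k 0 := by
          unfold pvPadded
          congr 1
          calc pvRevDigits k ((d + 1) % 10 * 10 ^ k)
              = pvRevDigits k ((d + 1) % 10 * 10 ^ k % 10 ^ k) := (revDigits_mod k _).symm
            _ = pvRevDigits k 0 := by rw [hMmod]
        refine Prod.ext ?_ ?_
        · show _ :: _ = pvRepl (ch :: t) _
          rw [hM, padded_head]
          rw [pvRepl, if_pos hd]
          rw [hMdiv, Nat.mod_mod_of_dvd (d+1) (dvd_refl 10), h0, hco, Nat.mod_self]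
        · show (if d = 9 then (1:Int) else 0) = _
          by_cases h9 : d = 9
          · rw [if_pos h9, if_pos (hcout.mpr h9)]
          · rw [if_neg h9, if_neg (fun hcon => h9 (hcout.mp hcon))]
      · -- no carry from the right part
        have hlt : n + c.toNat < 10 ^ k := by omega
        have hstep : pvStep ch (if n + c.toNat = 10 ^ k then 1 else 0) = (ch, 0) := by
          rw [if_neg hco, pvStep, if_neg (by simp)]
        have hMv : d * 10 ^ k + n + c.toNat < 10 ^ (k + 1) := by
          have h1 : d * 10 ^ k + n + c.toNat < (d + 1) * 10 ^ k := by
            have : d * 10 ^ k + (n + c.toNat) < d * 10 ^ k + 10 ^ k := by omega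
            calc d * 10 ^ k + n + c.toNat = d * 10 ^ k + (n + c.toNat) := by ring
              _ < d * 10 ^ k + 10 ^ k := this
              _ = (d + 1) * 10 ^ k := by ring
          have h2 : (d + 1) * 10 ^ k ≤ 10 * 10 ^ k := Nat.mul_le_mul_right _ (by omega)
          calc d * 10 ^ k + n + c.toNat < (d + 1) * 10 ^ k := h1
            _ ≤ 10 * 10 ^ k := h2
            _ = 10 ^ (k + 1) := by rw [pow_succ]; ring
        have hM : (d * 10 ^ k + n + c.toNat) % 10 ^ (k + 1) = d * 10 ^ k + (n + c.toNat) := by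
          rw [Nat.mod_eq_of_lt hMv]; ring
        have hMdiv : (d * 10 ^ k + (n + c.toNat)) / 10 ^ k = d := by
          rw [mul_comm d (10 ^ k), Nat.mul_add_div hpow, Nat.div_eq_of_lt hlt]
          omega
        have hMmod : (d * 10 ^ k + (n + c.toNat)) % 10 ^ k = n + c.toNat := by
          rw [mul_comm d (10 ^ k), Nat.mul_add_mod, Nat.mod_eq_of_lt hlt]
        rw [hstep]
        refine Prod.ext ?_ ?_
        · show ch :: pvRepl t (pvPadded k ((n + c.toNat) % 10 ^ k)) = pvRepl (ch :: t) _
          have hdh : (d * 10 ^ k + (n + c.toNat)) / 10 ^ k % 10 = d := by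
            rw [hMdiv]; omega
          have hpad : pvPadded k (d * 10 ^ k + (n + c.toNat)) = pvPadded k (n + c.toNat) := by
            unfold pvPadded
            congr 1
            calc pvRevDigits k (d * 10 ^ k + (n + c.toNat))
                = pvRevDigits k ((d * 10 ^ k + (n + c.toNat)) % 10 ^ k) := (revDigits_mod k _).symm
              _ = pvRevDigits k (n + c.toNat) := by rw [hMmod]
          rw [hM, padded_head, hdh, hpad, Nat.mod_eq_of_lt hlt]
          rw [pvRepl, if_pos hd, chr_digit ch hd]
        · show (0 : Int) = _
          rw [if_neg (Nat.ne_of_lt hMv)]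
    · have hfil : (ch :: t).filter PySem.Chars.isdigit = t.filter PySem.Chars.isdigit := by
        simp [List.filter_cons, hd]
      rw [pvIncW, ih, hfil]
      have hstep : ∀ co : Int, pvStep ch co = (ch, co) := by
        intro co; rw [pvStep, if_neg (by tauto)]
      rw [hstep]
      refine Prod.ext ?_ ?_
      · have hrepl : ∀ vs : List Nat, pvRepl (ch :: t) vs = ch :: pvRepl t vs := by
          intro vs; cases vs <;> simp [pvRepl, hd]
        show ch :: pvRepl t _ = pvRepl (ch :: t) _
        rw [hrepl]
      · rfl

lemma foldN_eq (ds : List Char) : ∀ (a : Nat), (∀ ch ∈ ds, PySem.Chars.isdigit ch = true) →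
    ds.foldl (fun a ch => 10 * a + pvDigitVal ch) ((a : Nat) : Int)
      = ((ds.foldl (fun a c => 10 * a + (c.toNat - 48)) a : Nat) : Int) := by
  induction ds with
  | nil => intro a _; rfl
  | cons x t ih =>
    intro a h
    simp only [List.foldl_cons]
    rw [digitVal_eq x (h x (by simp)),
      show (10 : Int) * ((a : Nat) : Int) + ((x.toNat - 48 : Nat) : Int)
         = (((10 * a + (x.toNat - 48) : Nat) : Nat) : Int) by push_cast; ring]
    exact ih _ (fun c hc => h c (by simp [hc]))

lemma toNew_fold (ds : List Char) : ∀ (M : Nat) (acc : List Int),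
    ds.foldl pvToNew (acc, ((M : Nat) : Int))
      = (acc ++ (pvRevDigits ds.length M).map (fun v => ((v : Nat) : Int)), ((M / 10 ^ ds.length : Nat) : Int)) := by
  induction ds with
  | nil => intro M acc; simp [pvRevDigits]
  | cons x t ih =>
    intro M acc
    simp only [List.foldl_cons, pvToNew, mod10_cast M, fdiv10_cast M]
    rw [ih (M / 10) (acc ++ [((M % 10 : Nat) : Int)])]
    have hd : M / 10 / 10 ^ t.length = M / 10 ^ (x :: t).length := by
      rw [Nat.div_div_eq_div_mul]; simp [pow_succ]; ring_nf
    simp [pvRevDigits, hd]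

lemma writeOut_fold (w : List Char) : ∀ (vs : List Nat) (acc : List Char),
    (∀ v ∈ vs, v ≤ 9) → vs.length = (w.filter PySem.Chars.isdigit).length →
    w.foldl pvWriteOut (vs.map (fun v => ((v : Nat) : Int)), acc) = ([], acc ++ pvRepl w vs) := by
  induction w with
  | nil =>
    intro vs acc _ hlen
    simp only [List.filter_nil, List.length_nil, List.length_eq_zero_iff] at hlen
    subst hlen
    simp [pvRepl]
  | cons ch t ih =>
    intro vs acc hle hlen
    by_cases hd : PySem.Chars.isdigit ch = true
    · match vs with
      | [] => simp [List.filter_cons, hd] at hlen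
      | v :: vs' =>
        simp only [List.filter_cons, hd, if_true, List.length_cons] at hlen
        simp only [List.foldl_cons, List.map_cons, pvWriteOut, hd, if_true]
        rw [strDigit_eq v (hle v (by simp))]
        rw [ih vs' (acc ++ [Char.ofNat (48 + v)]) (fun u hu => hle u (by simp [hu])) (by omega)]
        simp [pvRepl, hd]
    · simp only [List.filter_cons, hd] at hlen
      simp only [List.foldl_cons, pvWriteOut, hd, Bool.false_eq_true, if_false]
      rw [ih vs (acc ++ [ch]) hle (by simpa using hlen)]
      simp [pvRepl, hd]

-- ===== VERDICT (by name: the statement is the Claim_ definition above) =====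
theorem increment_thai_phone_spec : Claim_equal_increment_thai_phone := by
  intro phone _
  simp only [Spec_increment_thai_phone, increment_thai_phone, increment_thai_phone_alt]
  by_cases hg : ¬ (PySem.Str.startswith phone "+" = true) ∨ PySem.Str.len phone < 8
  · rw [if_pos hg, if_pos hg]
  · rw [if_neg hg, if_neg hg]
    push_neg at hg
    have hlen : 8 ≤ phone.toList.length := by
      have := hg.2
      simp only [PySem.Str.len, not_lt] at this
      exact_mod_cast this
    obtain ⟨c0, t, hct⟩ : ∃ c0 t, phone.toList = c0 :: t := by
      cases h : phone.toList with
      | nil => rw [h] at hlen; simp at hlen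
      | cons a b => exact ⟨a, b, rfl⟩
    rw [hct]
    have htl : 7 ≤ t.length := by rw [hct] at hlen; simp at hlen; omega
    have hA : pvLoopA (c0 :: t) 1 7 = c0 :: (pvIncW (t.take 7) 1).1 ++ t.drop 7 := by
      have h7 := loopA_eq 7 t c0 1 htl
      simpa using h7
    have hhead : PySem.List.slice (c0 :: t) none (some 1) = [c0] := by
      rw [show (1:Int) = ((1:Nat):Int) from rfl, PySem.List.slice_to_natCast]
      rfl
    have hwin : PySem.List.slice (c0 :: t) (some 1) (some 8) = t.take 7 := by
      rw [show (1:Int) = ((1:Nat):Int) from rfl, show (8:Int) = ((8:Nat):Int) from rfl,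
        PySem.List.slice_natCast]
      simp
    have hrest : PySem.List.slice (c0 :: t) (some 8) none = t.drop 7 := by
      rw [show (8:Int) = ((8:Nat):Int) from rfl, PySem.List.slice_from_natCast]
      simp
    rw [hA, hhead, hwin, hrest]
    set w := t.take 7 with hw
    set ds := w.filter PySem.Chars.isdigit with hdsdef
    have hds : ∀ ch ∈ ds, PySem.Chars.isdigit ch = true := fun ch h => (List.mem_filter.mp h).2
    set k := ds.length with hkdef
    set n := pvValN ds with hndef
    have hfold : ds.foldl (fun a ch => 10 * a + pvDigitVal ch) 0 = ((n : Nat) : Int) := by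
      rw [show (0:Int) = ((0:Nat):Int) from rfl, foldN_eq ds 0 hds]
      rfl
    have hmp : PySem.Int.mod (((n : Nat) : Int) + 1) (10 ^ k) = (((n + 1) % 10 ^ k : Nat) : Int) := by
      rw [show ((n : Nat) : Int) + 1 = (((n + 1 : Nat)) : Int) by norm_cast,
        show (10:Int) ^ k = (((10 ^ k : Nat)) : Int) by norm_cast,
        mod_cast_py]
    set M := (n + 1) % 10 ^ k with hMdef
    rw [hfold, hmp]
    have hnew : ((ds.foldl pvToNew ([], ((M : Nat) : Int))).1).reverse
        = (pvPadded k M).map (fun v => ((v : Nat) : Int)) := by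
      rw [toNew_fold ds M []]
      simp only [List.nil_append, pvPadded, List.map_reverse, List.reverse_inj]
      rfl
    rw [hnew]
    have hvs9 : ∀ v ∈ pvPadded k M, v ≤ 9 := by
      intro v hv
      exact revDigits_le k M v (List.mem_reverse.mp hv)
    have hvslen : (pvPadded k M).length = (w.filter PySem.Chars.isdigit).length := by
      simp only [pvPadded, List.length_reverse, revDigits_len]
      rfl
    have hout := writeOut_fold w (pvPadded k M) [] hvs9 hvslen
    rw [hout]
    have hcore := pvIncW_core w 1 (Or.inr rfl)
    have h1 : ((1:Int)).toNat = 1 := rfl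
    rw [h1] at hcore
    have hfst : (pvIncW w 1).1 = pvRepl w (pvPadded k M) := by
      rw [hcore]
    rw [hfst]
    simp
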